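-- pv_equiv track=rewrite | github.com/bakunobu/exercise | 1400_basic_tasks/chap_9/ex_9_11.py | max_salary_per_month
-- ===== SOURCE A (Python) =====
-- def max_salary_per_month(my_list:list) -> list:
--     max_salaries_month = []
--     salaries_month_1 = [month[0] for month in my_list]
--     salaries_month_2 = [month[1] for month in my_list]
--     salaries_month_3 = [month[2] for month in my_list]
--     for month in (salaries_month_1,
--                   salaries_month_2,
--                   salaries_month_3):
--         max_salary = max(month)
--         max_salaries_month.append(month.index(max_salary))
--
--     return(max_salaries_month)
-- ===== SOURCE B (Python) =====
-- def max_salary_per_month(my_list: list) -> list: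
--     if not my_list:
--         raise ValueError('max() arg is an empty sequence')
--     b0 = b1 = b2 = None  # (best salary, its first index) per month column
--     for i, row in enumerate(my_list):
--         s0, s1, s2 = row[0], row[1], row[2]
--         if b0 is None or s0 > b0[0]:
--             b0 = (s0, i)
--         if b1 is None or s1 > b1[0]:
--             b1 = (s1, i)
--         if b2 is None or s2 > b2[0]:
--             b2 = (s2, i)
--     return [b0[1], b1[1], b2[1]]
-- ===== Notes on version B (the rewrite author's own statement) =====
-- stated objective: alternative
-- what changed: Instead of materialising three column lists and then calling max() and list.index() (three extra passes) on each, B makes a single pass over the rows maintaining a (best_salary, first_index) pair per column, with strict-greater updates preserving the first occurrence.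
import Mathlib
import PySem

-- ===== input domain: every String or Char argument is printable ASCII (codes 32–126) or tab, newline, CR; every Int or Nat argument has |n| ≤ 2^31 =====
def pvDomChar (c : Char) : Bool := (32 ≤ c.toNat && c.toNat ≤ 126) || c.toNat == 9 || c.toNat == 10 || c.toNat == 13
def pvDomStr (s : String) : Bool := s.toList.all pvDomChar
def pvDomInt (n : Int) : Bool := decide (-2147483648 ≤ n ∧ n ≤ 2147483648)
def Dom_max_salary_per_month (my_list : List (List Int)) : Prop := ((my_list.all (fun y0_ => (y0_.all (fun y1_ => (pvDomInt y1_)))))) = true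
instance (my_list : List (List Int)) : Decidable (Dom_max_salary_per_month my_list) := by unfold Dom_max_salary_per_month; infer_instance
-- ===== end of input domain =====

-- B replaces A's three materialised column lists plus max()/list.index() passes by a single pass
-- over the rows keeping a (best salary, first index) pair per column (objective: alternative).


-- ===== PORT A =====
def max_salary_per_month (my_list : List (List Int)) : List Int :=
  let salaries_month_1 := my_list.map (fun month => PySem.List.pyGetD month 0 0)
  let salaries_month_2 := my_list.map (fun month => PySem.List.pyGetD month 1 0)
  let salaries_month_3 := my_list.map (fun month => PySem.List.pyGetD month 2 0)
  [salaries_month_1, salaries_month_2, salaries_month_3].foldl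
    (fun max_salaries_month month =>
      let max_salary := (PySem.List.max? month (fun y => y)).getD 0
      max_salaries_month ++ [(((PySem.List.index? month max_salary).getD 0 : Nat) : Int)])
    []

-- ===== PORT B =====
-- 'b is None or s > b[0]'-update of one column's (best salary, first index) pair
def updBest (b : Option (Int × Int)) (s : Int) (i : Int) : Option (Int × Int) :=
  match b with
  | none => some (s, i)
  | some (m, j) => if m < s then some (s, i) else some (m, j)

def max_salary_per_month_alt (my_list : List (List Int)) : List Int :=
  let st := (PySem.List.enumerate my_list 0).foldl
    (fun (st : Option (Int × Int) × Option (Int × Int) × Option (Int × Int)) p =>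
      (updBest st.1 (PySem.List.pyGetD p.2 0 0) p.1,
       updBest st.2.1 (PySem.List.pyGetD p.2 1 0) p.1,
       updBest st.2.2 (PySem.List.pyGetD p.2 2 0) p.1))
    (none, none, none)
  match st with
  | (some b0, some b1, some b2) => [b0.2, b1.2, b2.2]
  | _ => []   -- unreachable: Python B raises ValueError on the empty list, which Pre_ excludes

-- ===== PRECONDITION & SPEC =====
-- Pre_ excludes the inputs on which Python A raises: the empty list (ValueError from max([]))
-- and lists containing a row of fewer than 3 entries (IndexError in the comprehensions).
def Pre_max_salary_per_month (my_list : List (List Int)) : Prop :=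
  my_list ≠ [] ∧ ∀ row ∈ my_list, 3 ≤ row.length
instance (my_list : List (List Int)) : Decidable (Pre_max_salary_per_month my_list) := by
  unfold Pre_max_salary_per_month; infer_instance

def pvWitness_max_salary_per_month : List (List Int) := [[10, 20, 30], [40, 5, 30]]

def Spec_max_salary_per_month (my_list : List (List Int)) (out : List Int) : Prop := out = max_salary_per_month_alt my_list
instance (my_list : List (List Int)) (out : List Int) : Decidable (Spec_max_salary_per_month my_list out) := by unfold Spec_max_salary_per_month; infer_instance

-- ===== CLAIM (what is proved, stated in full; the proofs are below) =====
def Claim_equal_max_salary_per_month : Prop := ∀ (my_list : List (List Int)), Dom_max_salary_per_month my_list → Pre_max_salary_per_month my_list → Spec_max_salary_per_month my_list (max_salary_per_month my_list)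

-- ===== LEMMAS AND PROOFS =====

-- one column's single-pass loop, indices starting at s
def colFold (xs : List Int) (s : Int) (b : Option (Int × Int)) : Option (Int × Int) :=
  match xs with
  | [] => b
  | x :: t => colFold t (s + 1) (updBest b x s)

lemma tripleFold_split (l : List (List Int)) (s : Int)
    (b0 b1 b2 : Option (Int × Int)) :
    (PySem.List.enumerate l s).foldl
      (fun (st : Option (Int × Int) × Option (Int × Int) × Option (Int × Int)) p =>
        (updBest st.1 (PySem.List.pyGetD p.2 0 0) p.1,
         updBest st.2.1 (PySem.List.pyGetD p.2 1 0) p.1,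
         updBest st.2.2 (PySem.List.pyGetD p.2 2 0) p.1))
      (b0, b1, b2)
    = (colFold (l.map (fun m => PySem.List.pyGetD m 0 0)) s b0,
       colFold (l.map (fun m => PySem.List.pyGetD m 1 0)) s b1,
       colFold (l.map (fun m => PySem.List.pyGetD m 2 0)) s b2) := by
  induction l generalizing s b0 b1 b2 with
  | nil => simp [PySem.List.enumerate_nil, colFold]
  | cons r t ih => simp [PySem.List.enumerate_cons, colFold, ih]

lemma foldl_max_mem (t : List Int) (x : Int) : t.foldl max x = x ∨ t.foldl max x ∈ t := by
  induction t generalizing x with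
  | nil => left; rfl
  | cons y t ih =>
    simp only [List.foldl]
    rcases ih (max x y) with h | h
    · rcases le_total y x with hle | hle
      · left; rw [h, max_eq_left hle]
      · right; rw [h, max_eq_right hle]; exact List.mem_cons_self
    · right; exact List.mem_cons_of_mem _ h

lemma colFold_some (t : List Int) (m j s : Int) :
    colFold t s (some (m, j)) =
      some (t.foldl max m,
            if t.foldl max m ≤ m then j
            else s + (((PySem.List.index? t (t.foldl max m)).getD 0 : Nat) : Int)) := by
  induction t generalizing m j s with
  | nil => simp [colFold]
  | cons y t ih =>
    by_cases h : m < y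
    · simp only [colFold, updBest, if_pos h, List.foldl]
      rw [ih y s (s + 1)]
      have hmy : max m y = y := max_eq_right h.le
      have hyM : y ≤ t.foldl max y := (PySem.List.le_foldl_max t y).1
      rw [hmy]
      have hnle : ¬ t.foldl max y ≤ m := by omega
      by_cases hMy : t.foldl max y ≤ y
      · have hEq : t.foldl max y = y := le_antisymm hMy hyM
        rw [hEq] at hnle ⊢
        rw [PySem.List.index?_cons_self]
        simp [hnle]
      · have hne : y ≠ t.foldl max y := by omega
        have hmem : t.foldl max y ∈ t := by
          rcases foldl_max_mem t y with he | hm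
          · omega
          · exact hm
        rw [PySem.List.index?_cons_of_ne _ hne]
        obtain ⟨k, hk⟩ := Option.isSome_iff_exists.mp ((PySem.List.index?_isSome_iff t _).mpr hmem)
        rw [hk]
        simp only [if_neg hnle, if_neg hMy, Option.map_some, Option.getD_some]
        have : ((k + 1 : Nat) : Int) = (k : Int) + 1 := by push_cast; ring
        rw [this]; congr 1; ring
    · have hy : y ≤ m := not_lt.mp h
      simp only [colFold, updBest, if_neg h, List.foldl]
      rw [ih m j (s + 1)]
      have hmy : max m y = m := max_eq_left hy
      rw [hmy]
      by_cases hMm : t.foldl max m ≤ m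
      · simp [hMm]
      · have hne : y ≠ t.foldl max m := by omega
        have hmem : t.foldl max m ∈ t := by
          rcases foldl_max_mem t m with he | hm
          · omega
          · exact hm
        rw [PySem.List.index?_cons_of_ne _ hne]
        obtain ⟨k, hk⟩ := Option.isSome_iff_exists.mp ((PySem.List.index?_isSome_iff t _).mpr hmem)
        rw [hk]
        simp only [if_neg hMm, Option.map_some, Option.getD_some]
        have : ((k + 1 : Nat) : Int) = (k : Int) + 1 := by push_cast; ring
        rw [this]; congr 1; ring

-- one column: the single-pass loop computes (max, index of max) exactly as A does
lemma colFold_spec (x : Int) (t : List Int) :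
    colFold (x :: t) 0 none =
      some ((PySem.List.max? (x :: t) (fun y => y)).getD 0,
            (((PySem.List.index? (x :: t) ((PySem.List.max? (x :: t) (fun y => y)).getD 0)).getD 0 : Nat) : Int)) := by
  have hx : x ≤ t.foldl max x := (PySem.List.le_foldl_max t x).1
  rw [show colFold (x :: t) 0 none = colFold t 1 (some (x, 0)) by simp [colFold, updBest]]
  rw [colFold_some, PySem.List.max?_id_cons]
  simp only [Option.getD_some]
  by_cases hMx : t.foldl max x ≤ x
  · have hEq : t.foldl max x = x := le_antisymm hMx hx
    rw [hEq, PySem.List.index?_cons_self]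
    simp [hMx]
  · have hne : x ≠ t.foldl max x := by omega
    have hmem : t.foldl max x ∈ t := by
      rcases foldl_max_mem t x with he | hm
      · omega
      · exact hm
    rw [PySem.List.index?_cons_of_ne _ hne]
    obtain ⟨k, hk⟩ := Option.isSome_iff_exists.mp ((PySem.List.index?_isSome_iff t _).mpr hmem)
    rw [hk]
    simp only [if_neg hMx, Option.map_some, Option.getD_some]
    congr 1
    push_cast; ring

-- ===== VERDICT (by name: the statement is the Claim_ definition above) =====
theorem max_salary_per_month_spec : Claim_equal_max_salary_per_month := by
  intro my_list _ hpre
  obtain ⟨hne, _⟩ := hpre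
  obtain ⟨r, rest, rfl⟩ := List.exists_cons_of_ne_nil hne
  show max_salary_per_month _ = max_salary_per_month_alt _
  simp only [max_salary_per_month, max_salary_per_month_alt, List.map_cons, List.foldl,
    tripleFold_split, colFold_spec]
  simp
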